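-- pv_equiv track=rewrite | github.com/horowitz-lab/photon-counting | photonCommTrial.py | bytesToList
-- ===== SOURCE A (Python) =====
-- def bytesToList(bStr):
--     dList = []
--     curVal = 0
--     #iterate through the bytes, accumulating a value in curVal
--     for b in bStr:
--         #if carriage return, the number has ended
--         if b == 13:
--             dList.append(curVal)
--             curVal = 0
--         #else, take 10 times the current value, and add the next number
--         #ascii - 48 is the numerical value
--         else:
--             curVal = curVal * 10 + b - 48
--
--     return dList
-- ===== SOURCE B (Python) =====
-- def bytesToList(bStr):
--     # split-then-fold: first split the byte stream on CR (13) into the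
--     # segments before each CR, then decode each segment independently.
--     parts = []
--     cur = []
--     for b in bStr:
--         if b == 13:
--             parts.append(cur)
--             cur = []
--         else:
--             cur.append(b)
--     out = []
--     for part in parts:
--         v = 0
--         for b in part:
--             v = v * 10 + b - 48
--         out.append(v)
--     return out
-- ===== Notes on version B (the rewrite author's own statement) =====
-- stated objective: alternative
-- what changed: B decomposes the task into two passes: first split the byte stream on CR (13) into segments, then decode each segment with an independent base-10 fold, instead of A's single pass threading one running accumulator that is reset on each CR.
import Mathlib
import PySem

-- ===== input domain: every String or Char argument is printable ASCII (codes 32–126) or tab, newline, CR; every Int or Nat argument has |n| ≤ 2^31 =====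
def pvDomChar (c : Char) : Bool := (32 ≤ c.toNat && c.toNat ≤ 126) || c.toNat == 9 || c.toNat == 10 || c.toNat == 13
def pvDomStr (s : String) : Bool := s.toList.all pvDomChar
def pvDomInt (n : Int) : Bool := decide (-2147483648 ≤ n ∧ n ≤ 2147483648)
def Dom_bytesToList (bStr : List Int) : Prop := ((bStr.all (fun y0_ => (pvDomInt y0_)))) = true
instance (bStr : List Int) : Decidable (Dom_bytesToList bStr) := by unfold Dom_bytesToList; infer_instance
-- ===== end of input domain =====

-- B splits the byte stream on CR (13) into segments first and then decodes each
-- segment with an independent base-10 fold, instead of A's single-pass running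
-- accumulator reset on each CR (objective: alternative decomposition, same cost).


-- ===== PORT A =====
-- single pass: accumulate curVal, append and reset on each 13
def bytesToList (bStr : List Int) : List Int :=
  (bStr.foldl
    (fun (st : List Int × Int) b =>
      if b == 13 then (st.1 ++ [st.2], 0)
      else (st.1, st.2 * 10 + b - 48))
    ([], 0)).1

-- ===== PORT B =====
-- pass 1: split the stream on 13 into the segments before each 13
def pvSplitCR (bStr : List Int) : List (List Int) :=
  (bStr.foldl
    (fun (st : List (List Int) × List Int) b =>
      if b == 13 then (st.1 ++ [st.2], [])
      else (st.1, st.2 ++ [b]))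
    ([], [])).1

-- pass 2: decode one segment as a base-10 value
def pvDecode (part : List Int) : Int :=
  part.foldl (fun v b => v * 10 + b - 48) 0

def bytesToList_alt (bStr : List Int) : List Int :=
  (pvSplitCR bStr).map pvDecode

-- ===== PRECONDITION & SPEC =====
def Spec_bytesToList (bStr : List Int) (out : List Int) : Prop := out = bytesToList_alt bStr
instance (bStr : List Int) (out : List Int) : Decidable (Spec_bytesToList bStr out) := by unfold Spec_bytesToList; infer_instance

-- ===== CLAIM (what is proved, stated in full; the proofs are below) =====
def Claim_equal_bytesToList : Prop := ∀ (bStr : List Int), Dom_bytesToList bStr → Spec_bytesToList bStr (bytesToList bStr)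

-- ===== LEMMAS AND PROOFS =====
lemma pvDecode_concat (cur : List Int) (b : Int) :
    pvDecode (cur ++ [b]) = pvDecode cur * 10 + b - 48 := by
  simp [pvDecode]

lemma pv_main (xs : List Int) : ∀ (parts : List (List Int)) (cur : List Int),
    (xs.foldl
      (fun (st : List Int × Int) b =>
        if b == 13 then (st.1 ++ [st.2], 0)
        else (st.1, st.2 * 10 + b - 48))
      (parts.map pvDecode, pvDecode cur)).1
    = ((xs.foldl
        (fun (st : List (List Int) × List Int) b =>
          if b == 13 then (st.1 ++ [st.2], [])
          else (st.1, st.2 ++ [b]))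
        (parts, cur)).1).map pvDecode := by
  induction xs with
  | nil => intro parts cur; simp
  | cons b xs ih =>
    intro parts cur
    by_cases h : b = 13
    · subst h
      simpa [pvDecode] using ih (parts ++ [cur]) []
    · simpa [h, ← pvDecode_concat] using ih parts (cur ++ [b])

-- ===== VERDICT (by name: the statement is the Claim_ definition above) =====
theorem bytesToList_spec : Claim_equal_bytesToList := by
  intro bStr _
  show bytesToList bStr = bytesToList_alt bStr
  have := pv_main bStr [] []
  simpa [bytesToList, bytesToList_alt, pvSplitCR, pvDecode] using this
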